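-- pv_equiv track=rewrite | github.com/LuniuLun/RealEstate | Backend/src/main/resources/forecast.py | get_land_characteristics
-- ===== SOURCE A (Python) =====
-- def get_land_characteristics(ids):
--     id_map = {
--         1: "1 Part Residential",
--         2: "All Residential",
--         3: "Back Expansion",
--         4: "Car Alley",
--         5: "Frontage",
--         6: "No Residential"
--     }
--     return {v: 1 if i in ids else 0 for i, v in id_map.items()}
-- ===== SOURCE B (Python) =====
-- def get_land_characteristics(ids):
--     id_map = {
--         1: "1 Part Residential",
--         2: "All Residential",
--         3: "Back Expansion",
--         4: "Car Alley",
--         5: "Frontage",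
--         6: "No Residential"
--     }
--     result = {v: 0 for v in id_map.values()}
--     for i in ids:
--         label = id_map.get(i)
--         if label is not None:
--             result[label] = 1
--     return result
-- ===== Notes on version B (the rewrite author's own statement) =====
-- stated objective: alternative
-- what changed: B builds the all-zero label dict once and then drives the loop over ids, flagging each mapped label via a dict lookup, instead of A's comprehension over the six map entries with an 'i in ids' list scan per entry.
import Mathlib
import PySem

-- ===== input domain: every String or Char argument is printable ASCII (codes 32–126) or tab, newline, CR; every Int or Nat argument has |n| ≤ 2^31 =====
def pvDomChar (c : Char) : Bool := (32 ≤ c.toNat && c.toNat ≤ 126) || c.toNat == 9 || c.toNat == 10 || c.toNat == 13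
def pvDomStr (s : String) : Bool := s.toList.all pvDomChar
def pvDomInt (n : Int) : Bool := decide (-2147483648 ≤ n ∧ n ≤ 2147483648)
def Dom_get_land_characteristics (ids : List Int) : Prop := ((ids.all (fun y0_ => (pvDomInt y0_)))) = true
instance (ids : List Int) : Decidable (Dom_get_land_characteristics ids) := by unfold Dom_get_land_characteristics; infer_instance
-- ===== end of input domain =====

-- B flips the driving loop: it initializes every label's flag to 0 and iterates over ids,
-- setting the mapped label to 1, instead of A's comprehension over the six map entries
-- each probing `i in ids`. Return values proved equal for all inputs (both are total).

-- ===== PORT A =====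
-- id_map as an insertion-ordered association list (Python dict of the six fixed entries)
def pvIdMap : List (Int × String) :=
  [(1, "1 Part Residential"), (2, "All Residential"), (3, "Back Expansion"),
   (4, "Car Alley"), (5, "Frontage"), (6, "No Residential")]

-- {v: 1 if i in ids else 0 for i, v in id_map.items()}  (keys v are the six distinct labels)
def get_land_characteristics (ids : List Int) : List (String × Int) :=
  pvIdMap.map (fun p => (p.2, if ids.contains p.1 then (1 : Int) else 0))

-- ===== PORT B =====
-- result[label] = 1 : dict assignment; label is always a present key, so this is
-- overwrite-in-place on the association list (exact for Python dict assignment here).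
def pvSetOne : List (String × Int) → String → List (String × Int)
  | [], _ => []
  | (k, v) :: rest, key => if k == key then (k, (1 : Int)) :: rest else (k, v) :: pvSetOne rest key

-- id_map.get(i) : first match in the association list (exact: keys are distinct)
def pvLookup : List (Int × String) → Int → Option String
  | [], _ => none
  | (k, v) :: rest, i => if k == i then some v else pvLookup rest i

-- loop body: if id_map.get(i) hits, set that label's flag to 1
def pvStep (res : List (String × Int)) (i : Int) : List (String × Int) :=
  match pvLookup pvIdMap i with
  | some label => pvSetOne res label
  | none => res

def get_land_characteristics_alt (ids : List Int) : List (String × Int) :=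
  ids.foldl pvStep (pvIdMap.map (fun p => (p.2, (0 : Int))))

-- ===== PRECONDITION & SPEC =====
def Spec_get_land_characteristics (ids : List Int) (out : List (String × Int)) : Prop := out = get_land_characteristics_alt ids
instance (ids : List Int) (out : List (String × Int)) : Decidable (Spec_get_land_characteristics ids out) := by unfold Spec_get_land_characteristics; infer_instance

-- ===== CLAIM (what is proved, stated in full; the proofs are below) =====
def Claim_equal_get_land_characteristics : Prop := ∀ (ids : List Int), Dom_get_land_characteristics ids → Spec_get_land_characteristics ids (get_land_characteristics ids)

-- ===== LEMMAS AND PROOFS =====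

-- Invariant: folding B's step over ids from any six-value state sets exactly the flags of ids' mapped labels.
theorem pv_fold_char (ids : List Int) (v1 v2 v3 v4 v5 v6 : Int) :
    ids.foldl pvStep
      [("1 Part Residential", v1), ("All Residential", v2), ("Back Expansion", v3),
       ("Car Alley", v4), ("Frontage", v5), ("No Residential", v6)] =
    [("1 Part Residential", if ids.contains 1 then 1 else v1),
     ("All Residential", if ids.contains 2 then 1 else v2),
     ("Back Expansion", if ids.contains 3 then 1 else v3),
     ("Car Alley", if ids.contains 4 then 1 else v4),
     ("Frontage", if ids.contains 5 then 1 else v5),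
     ("No Residential", if ids.contains 6 then 1 else v6)] := by
  induction ids generalizing v1 v2 v3 v4 v5 v6 with
  | nil => simp
  | cons x xs ih =>
    by_cases h1 : x = 1
    · subst h1
      rw [List.foldl_cons,
          show pvStep [("1 Part Residential", v1), ("All Residential", v2), ("Back Expansion", v3),
            ("Car Alley", v4), ("Frontage", v5), ("No Residential", v6)] 1
            = [("1 Part Residential", 1), ("All Residential", v2), ("Back Expansion", v3),
               ("Car Alley", v4), ("Frontage", v5), ("No Residential", v6)] from rfl, ih]
      simp
    · by_cases h2 : x = 2
      · subst h2
        rw [List.foldl_cons,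
            show pvStep [("1 Part Residential", v1), ("All Residential", v2), ("Back Expansion", v3),
              ("Car Alley", v4), ("Frontage", v5), ("No Residential", v6)] 2
              = [("1 Part Residential", v1), ("All Residential", 1), ("Back Expansion", v3),
                 ("Car Alley", v4), ("Frontage", v5), ("No Residential", v6)] from rfl, ih]
        simp
      · by_cases h3 : x = 3
        · subst h3
          rw [List.foldl_cons,
              show pvStep [("1 Part Residential", v1), ("All Residential", v2), ("Back Expansion", v3),
                ("Car Alley", v4), ("Frontage", v5), ("No Residential", v6)] 3
                = [("1 Part Residential", v1), ("All Residential", v2), ("Back Expansion", 1),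
                   ("Car Alley", v4), ("Frontage", v5), ("No Residential", v6)] from rfl, ih]
          simp
        · by_cases h4 : x = 4
          · subst h4
            rw [List.foldl_cons,
                show pvStep [("1 Part Residential", v1), ("All Residential", v2), ("Back Expansion", v3),
                  ("Car Alley", v4), ("Frontage", v5), ("No Residential", v6)] 4
                  = [("1 Part Residential", v1), ("All Residential", v2), ("Back Expansion", v3),
                     ("Car Alley", 1), ("Frontage", v5), ("No Residential", v6)] from rfl, ih]
            simp
          · by_cases h5 : x = 5
            · subst h5
              rw [List.foldl_cons,
                  show pvStep [("1 Part Residential", v1), ("All Residential", v2), ("Back Expansion", v3),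
                    ("Car Alley", v4), ("Frontage", v5), ("No Residential", v6)] 5
                    = [("1 Part Residential", v1), ("All Residential", v2), ("Back Expansion", v3),
                       ("Car Alley", v4), ("Frontage", 1), ("No Residential", v6)] from rfl, ih]
              simp
            · by_cases h6 : x = 6
              · subst h6
                rw [List.foldl_cons,
                    show pvStep [("1 Part Residential", v1), ("All Residential", v2), ("Back Expansion", v3),
                      ("Car Alley", v4), ("Frontage", v5), ("No Residential", v6)] 6
                      = [("1 Part Residential", v1), ("All Residential", v2), ("Back Expansion", v3),
                         ("Car Alley", v4), ("Frontage", v5), ("No Residential", 1)] from rfl, ih]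
                simp
              · have hlk : pvLookup pvIdMap x = none := by
                  simp [pvLookup, pvIdMap, Ne.symm h1, Ne.symm h2, Ne.symm h3,
                        Ne.symm h4, Ne.symm h5, Ne.symm h6]
                rw [List.foldl_cons, show pvStep [("1 Part Residential", v1), ("All Residential", v2),
                      ("Back Expansion", v3), ("Car Alley", v4), ("Frontage", v5),
                      ("No Residential", v6)] x
                      = [("1 Part Residential", v1), ("All Residential", v2), ("Back Expansion", v3),
                         ("Car Alley", v4), ("Frontage", v5), ("No Residential", v6)] from by
                      simp [pvStep, hlk], ih]
                simp [Ne.symm h1, Ne.symm h2, Ne.symm h3, Ne.symm h4, Ne.symm h5, Ne.symm h6]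

-- ===== VERDICT (by name: the statement is the Claim_ definition above) =====
theorem get_land_characteristics_spec : Claim_equal_get_land_characteristics := by
  intro ids _
  show get_land_characteristics ids = get_land_characteristics_alt ids
  rw [get_land_characteristics_alt,
      show pvIdMap.map (fun p => (p.2, (0 : Int))) =
      [("1 Part Residential", (0:Int)), ("All Residential", 0), ("Back Expansion", 0),
       ("Car Alley", 0), ("Frontage", 0), ("No Residential", 0)] from rfl,
      pv_fold_char]
  simp [get_land_characteristics, pvIdMap]
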